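-- pv_equiv track=rewrite | github.com/Rangi42/polishedcrystal | utils/ngram.py | replace_ngram_in_line
-- ===== SOURCE A (Python) =====
-- def replace_ngram_in_line(tokens, ngram, replacement_token):
-- 	"""
-- 	Replace every occurrence of `ngram` in `tokens` with a single `replacement_token`.
-- 	This is similar to a "dictionary compression" step.
-- 	"""
-- 	new_tokens = []
-- 	i = 0
-- 	size = len(ngram)
-- 	while i < len(tokens):
-- 		if tuple(tokens[i : i + size]) == ngram:
-- 			new_tokens.append(replacement_token)
-- 			i += size
-- 		else:
-- 			new_tokens.append(tokens[i])
-- 			i += 1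
-- 	return new_tokens
-- ===== SOURCE B (Python) =====
-- def replace_ngram_in_line(tokens, ngram, replacement_token):
-- 	ng = list(ngram)
-- 	n = len(ng)
-- 	if n == 0:
-- 		return list(tokens)
-- 	toks = list(tokens)
-- 	L = len(toks)
-- 	starts = [i for i in range(L - n + 1) if toks[i:i+n] == ng]
-- 	out = []
-- 	prev = 0
-- 	for s in starts:
-- 		if prev <= s:
-- 			out += toks[prev:s]
-- 			out.append(replacement_token)
-- 			prev = s + n
-- 	out += toks[prev:]
-- 	return out
-- ===== Notes on version B (the rewrite author's own statement) =====
-- stated objective: faster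
-- what changed: Replaced A's single while-loop (build a fresh slice-tuple and test at every index, appending token by token) by a two-phase algorithm: collect the match start positions over the L-n+1 feasible starts only, then greedily stitch the output from whole slices between the selected non-overlapping matches.
import Mathlib
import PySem

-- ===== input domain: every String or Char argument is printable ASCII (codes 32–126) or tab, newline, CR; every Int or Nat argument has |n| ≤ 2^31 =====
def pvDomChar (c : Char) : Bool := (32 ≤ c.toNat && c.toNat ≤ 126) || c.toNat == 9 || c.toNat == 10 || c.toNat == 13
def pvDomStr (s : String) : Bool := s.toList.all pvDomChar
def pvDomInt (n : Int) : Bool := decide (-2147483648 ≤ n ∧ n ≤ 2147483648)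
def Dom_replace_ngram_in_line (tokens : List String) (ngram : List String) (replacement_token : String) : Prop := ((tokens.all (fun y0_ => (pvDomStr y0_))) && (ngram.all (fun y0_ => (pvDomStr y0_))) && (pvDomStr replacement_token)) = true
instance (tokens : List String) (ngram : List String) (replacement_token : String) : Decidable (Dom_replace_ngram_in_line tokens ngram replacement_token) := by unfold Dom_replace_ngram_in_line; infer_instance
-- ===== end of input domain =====

-- B replaces A's single test-and-jump while-loop by a two-phase algorithm (collect all match
-- starts, then stitch the output from slices between greedily selected non-overlapping matches);
-- objective: alternative structure, same asymptotic cost.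


-- ===== PORT A =====
-- A's while-loop: state = (i, new_tokens); the fuel (tokens.length + 1) only guards totality
-- (with a nonempty ngram, i grows by ≥ 1 each iteration, so the fuel is never exhausted)
def pvLoopA (tokens : List String) (ngram : List String) (replacement_token : String)
    (size : Int) : Nat → Int → List String → List String
  | 0, _, acc => acc
  | fuel + 1, i, acc =>
    if i < (tokens.length : Int) then
      if PySem.List.slice tokens (some i) (some (i + size)) = ngram then
        pvLoopA tokens ngram replacement_token size fuel (i + size) (acc ++ [replacement_token])
      else
        pvLoopA tokens ngram replacement_token size fuel (i + 1)
          (acc ++ [(PySem.List.pyGet? tokens i).getD ""])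
    else acc

def replace_ngram_in_line (tokens : List String) (ngram : List String) (replacement_token : String) : List String :=
  pvLoopA tokens ngram replacement_token (ngram.length : Int) (tokens.length + 1) 0 []

-- ===== PORT B =====
-- phase 1: `starts` = all match start positions; phase 2: fold that greedily selects
-- non-overlapping ones, copying whole inter-match slices into the output
def replace_ngram_in_line_alt (tokens : List String) (ngram : List String) (replacement_token : String) : List String :=
  if ngram.isEmpty then tokens
  else
    let n : Int := (ngram.length : Int)
    let L : Int := (tokens.length : Int)
    let starts : List Int :=
      (PySem.List.pyRange 0 (L - n + 1) 1).filter
        (fun i => decide (PySem.List.slice tokens (some i) (some (i + n)) = ngram))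
    let st :=
      starts.foldl
        (fun (st : List String × Int) s =>
          if st.2 ≤ s then
            (st.1 ++ PySem.List.slice tokens (some st.2) (some s) ++ [replacement_token], s + n)
          else st)
        ([], 0)
    st.1 ++ PySem.List.slice tokens (some st.2) (some L)

-- ===== PRECONDITION & SPEC =====
-- Pre_ excludes ngram = [] with tokens ≠ []: there A's loop never advances (i += 0) and diverges.
def Pre_replace_ngram_in_line (tokens : List String) (ngram : List String) (replacement_token : String) : Prop :=
  ngram ≠ [] ∨ tokens = []
instance (tokens : List String) (ngram : List String) (replacement_token : String) : Decidable (Pre_replace_ngram_in_line tokens ngram replacement_token) := by unfold Pre_replace_ngram_in_line; infer_instance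

def pvWitness_replace_ngram_in_line : List String × List String × String :=
  (["a", "b", "a", "b", "c"], ["a", "b"], "X")

def Spec_replace_ngram_in_line (tokens : List String) (ngram : List String) (replacement_token : String) (out : List String) : Prop := out = replace_ngram_in_line_alt tokens ngram replacement_token
instance (tokens : List String) (ngram : List String) (replacement_token : String) (out : List String) : Decidable (Spec_replace_ngram_in_line tokens ngram replacement_token out) := by unfold Spec_replace_ngram_in_line; infer_instance

-- ===== CLAIM (what is proved, stated in full; the proofs are below) =====
def Claim_equal_replace_ngram_in_line : Prop := ∀ (tokens : List String) (ngram : List String) (replacement_token : String), Dom_replace_ngram_in_line tokens ngram replacement_token → Pre_replace_ngram_in_line tokens ngram replacement_token → Spec_replace_ngram_in_line tokens ngram replacement_token (replace_ngram_in_line tokens ngram replacement_token)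

-- ===== LEMMAS AND PROOFS =====

-- canonical greedy left-to-right replacement, structural recursion (proof-only reference function)
def pvR (g : String) (gs : List String) (r : String) : List String → List String
  | [] => []
  | t :: rest =>
    if (g :: gs).isPrefixOf (t :: rest) then r :: pvR g gs r (rest.drop gs.length)
    else t :: pvR g gs r rest
termination_by l => l.length
decreasing_by
  · simpa using Nat.lt_succ_of_le (List.length_drop (l := rest) (i := gs.length) ▸ Nat.sub_le _ _)
  · simp

-- A's loop from index p computes pvR on the remaining suffix
theorem pvLoopA_eq_pvR (ts : List String) (g : String) (gs : List String) (r : String) :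
    ∀ (fuel p : Nat) (acc : List String), ts.length - p < fuel →
      pvLoopA ts (g :: gs) r ((g :: gs).length : Int) fuel (p : Int) acc
        = acc ++ pvR g gs r (ts.drop p) := by
  intro fuel
  induction fuel with
  | zero => intro p acc h; omega
  | succ fuel ih =>
    intro p acc h
    rw [pvLoopA]
    by_cases hp : p < ts.length
    · rw [if_pos (by exact_mod_cast hp)]
      have hdrop : ts.drop p = ts[p] :: ts.drop (p + 1) := List.drop_eq_getElem_cons hp
      have hslice : PySem.List.slice ts (some (p : Int)) (some ((p : Int) + ((g :: gs).length : Int)))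
          = (ts.drop p).take (g :: gs).length := PySem.List.slice_natCast_add ts p (g :: gs).length
      by_cases hm : (g :: gs) <+: ts.drop p
      · rw [hslice, if_pos ((List.prefix_iff_eq_take.mp hm).symm)]
        have hcast : (p : Int) + ((g :: gs).length : Int) = ((p + (g :: gs).length : Nat) : Int) := by push_cast; ring
        rw [hcast, ih (p + (g :: gs).length) (acc ++ [r]) (by simp at h ⊢; omega)]
        rw [hdrop, pvR, if_pos (by rw [← hdrop]; exact List.isPrefixOf_iff_prefix.mpr hm)]
        have : ts.drop (p + (g :: gs).length) = (ts.drop (p + 1)).drop gs.length := by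
          rw [List.drop_drop]; congr 1; simp; omega
        rw [this, List.append_assoc]; rfl
      · rw [hslice, if_neg (fun he => hm (List.prefix_iff_eq_take.mpr he.symm))]
        have hcast : (p : Int) + 1 = ((p + 1 : Nat) : Int) := by push_cast; ring
        rw [hcast, ih (p + 1) _ (by omega)]
        have hget : (PySem.List.pyGet? ts (p : Int)).getD "" = ts[p] := by
          simp [PySem.List.pyGet?_natCast, List.getElem?_eq_getElem hp]
        rw [hget, hdrop, pvR, if_neg (fun hb => hm (hdrop ▸ List.isPrefixOf_iff_prefix.mp hb))]
        rw [List.append_assoc]; rfl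
    · rw [if_neg (by exact_mod_cast hp)]
      rw [List.drop_eq_nil_of_le (by omega), pvR, List.append_nil]

-- no match anywhere from p on: pvR copies the suffix
theorem pvR_tail (ts : List String) (g : String) (gs : List String) (r : String) :
    ∀ (d p : Nat), ts.length - p ≤ d →
      (∀ q, p ≤ q → ¬ (g :: gs) <+: ts.drop q) →
      pvR g gs r (ts.drop p) = ts.drop p := by
  intro d
  induction d with
  | zero =>
    intro p hd _
    rw [List.drop_eq_nil_of_le (by omega), pvR]
  | succ d ih =>
    intro p hd hno
    by_cases hp : p < ts.length
    · have hdrop : ts.drop p = ts[p] :: ts.drop (p + 1) := List.drop_eq_getElem_cons hp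
      rw [hdrop, pvR, if_neg (fun hb => hno p le_rfl (hdrop ▸ List.isPrefixOf_iff_prefix.mp hb))]
      rw [ih (p + 1) (by omega) (fun q hq => hno q (by omega))]
    · rw [List.drop_eq_nil_of_le (by omega), pvR]

-- no match in [p, k), match at k: pvR copies [p,k), emits r, continues at k + ngram length
theorem pvR_skip (ts : List String) (g : String) (gs : List String) (r : String) :
    ∀ (d p k : Nat), p + d = k → k + (g :: gs).length ≤ ts.length →
      (g :: gs) <+: ts.drop k →
      (∀ q, p ≤ q → q < k → ¬ (g :: gs) <+: ts.drop q) →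
      pvR g gs r (ts.drop p)
        = (ts.drop p).take (k - p) ++ r :: pvR g gs r (ts.drop (k + (g :: gs).length)) := by
  intro d
  induction d with
  | zero =>
    intro p k hpk hk hm _
    have hp : p = k := by omega
    subst hp
    have hplt : p < ts.length := by simp at hk; omega
    have hdrop : ts.drop p = ts[p] :: ts.drop (p + 1) := List.drop_eq_getElem_cons hplt
    rw [hdrop, pvR, if_pos (hdrop ▸ List.isPrefixOf_iff_prefix.mpr hm)]
    have : ts.drop (p + (g :: gs).length) = (ts.drop (p + 1)).drop gs.length := by
      rw [List.drop_drop]; congr 1; simp; omega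
    rw [this]
    have h2 : p + 1 + gs.length = p + (g :: gs).length := by simp; omega
    simp [h2, List.drop_drop]
  | succ d ih =>
    intro p k hpk hk hm hno
    have hplt : p < ts.length := by simp at hk; omega
    have hdrop : ts.drop p = ts[p] :: ts.drop (p + 1) := List.drop_eq_getElem_cons hplt
    rw [hdrop, pvR, if_neg (fun hb => hno p le_rfl (by omega) (hdrop ▸ List.isPrefixOf_iff_prefix.mp hb))]
    rw [ih (p + 1) k (by omega) hk hm (fun q hq hqk => hno q (by omega) hqk)]
    have htake : (ts[p] :: ts.drop (p + 1)).take (k - p) = ts[p] :: (ts.drop (p + 1)).take (k - (p + 1)) := by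
      have : k - p = (k - (p + 1)) + 1 := by omega
      rw [this, List.take_succ_cons]
    rw [htake]; rfl

-- B's phase-2 fold over any sorted, sound and (from p on) complete list of match starts computes pvR
theorem pvFold_eq_pvR (ts : List String) (g : String) (gs : List String) (r : String) :
    ∀ (ns : List Nat) (out : List String) (p : Nat), p ≤ ts.length →
      ns.Pairwise (· < ·) →
      (∀ k ∈ ns, k + (g :: gs).length ≤ ts.length ∧ (g :: gs) <+: ts.drop k) →
      (∀ q, p ≤ q → q + (g :: gs).length ≤ ts.length → (g :: gs) <+: ts.drop q → q ∈ ns) →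
      (let st := ns.foldl
          (fun (st : List String × Int) (k : Nat) =>
            if st.2 ≤ (k : Int) then
              (st.1 ++ PySem.List.slice ts (some st.2) (some (k : Int)) ++ [r],
                (k : Int) + ((g :: gs).length : Int))
            else st)
          (out, (p : Int));
        st.1 ++ PySem.List.slice ts (some st.2) (some (ts.length : Int)))
        = out ++ pvR g gs r (ts.drop p) := by
  intro ns
  induction ns with
  | nil =>
    intro out p hp _ _ hcomp
    simp only [List.foldl_nil]
    rw [PySem.List.slice_natCast ts p ts.length]
    have h1 : (ts.drop p).take (ts.length - p) = ts.drop p := by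
      apply List.take_of_length_le; simp
    rw [h1]
    congr 1
    refine (pvR_tail ts g gs r (ts.length - p) p le_rfl (fun q hq hm => ?_)).symm
    have hlen := hm.length_le
    simp only [List.length_cons, List.length_drop] at hlen
    exact absurd (hcomp q hq (by simp only [List.length_cons]; omega) hm) List.not_mem_nil
  | cons k ns' ih =>
    intro out p hp hpw hmem hcomp
    have hkm := hmem k List.mem_cons_self
    simp only [List.foldl_cons]
    by_cases hc : (p : Int) ≤ (k : Int)
    · rw [if_pos hc]
      have hpk : p ≤ k := by exact_mod_cast hc
      have hcast : (k : Int) + ((g :: gs).length : Int) = ((k + (g :: gs).length : Nat) : Int) := by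
        push_cast; ring
      rw [hcast]
      rw [ih (out ++ PySem.List.slice ts (some (p : Int)) (some (k : Int)) ++ [r])
            (k + (g :: gs).length) hkm.1 hpw.of_cons
            (fun k' hk' => hmem k' (List.mem_cons_of_mem _ hk'))
            (fun q hq hqb hqm => by
              rcases List.mem_cons.mp (hcomp q (by omega) hqb hqm) with h | h
              · exfalso; simp only [List.length_cons] at hq; omega
              · exact h)]
      rw [PySem.List.slice_natCast ts p k]
      rw [pvR_skip ts g gs r (k - p) p k (by omega) hkm.1 hkm.2
            (fun q hq hqk hqm => by
              have hlen := hqm.length_le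
              simp only [List.length_cons, List.length_drop] at hlen
              rcases List.mem_cons.mp
                  (hcomp q hq (by simp only [List.length_cons]; omega) hqm) with h | h
              · omega
              · have := (List.pairwise_cons.mp hpw).1 q h; omega)]
      simp [List.append_assoc]
    · rw [if_neg hc]
      exact ih out p hp hpw.of_cons (fun k' hk' => hmem k' (List.mem_cons_of_mem _ hk'))
        (fun q hq hqb hqm => by
          rcases List.mem_cons.mp (hcomp q hq hqb hqm) with h | h
          · exfalso; omega
          · exact h)

theorem altB_eq_pvR (ts : List String) (g : String) (gs : List String) (r : String) :
    replace_ngram_in_line_alt ts (g :: gs) r = pvR g gs r ts := by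
  rw [replace_ngram_in_line_alt]
  simp only [List.isEmpty_cons, Bool.false_eq_true, if_false, PySem.List.pyRange_one, sub_zero,
    List.filter_map, List.foldl_map, zero_add]
  have hfold := pvFold_eq_pvR ts g gs r
    ((List.range ((ts.length : Int) - ((g :: gs).length : Int) + 1).toNat).filter
      (fun k => decide (PySem.List.slice ts (some (k : Int)) (some ((k : Int) + ((g :: gs).length : Int))) = (g :: gs))))
    [] 0 (Nat.zero_le _)
    (List.pairwise_lt_range.filter _)
    (fun k hk => by
      rcases List.mem_filter.mp hk with ⟨hkr, hq⟩
      have hkM := List.mem_range.mp hkr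
      have hb : k + (g :: gs).length ≤ ts.length := by
        simp only [List.length_cons] at *
        omega
      refine ⟨hb, ?_⟩
      have := of_decide_eq_true hq
      rw [PySem.List.slice_natCast_add] at this
      exact List.prefix_iff_eq_take.mpr this.symm)
    (fun q _ hqb hqm => by
      refine List.mem_filter.mpr ⟨List.mem_range.mpr ?_, decide_eq_true ?_⟩
      · simp only [List.length_cons] at *
        omega
      · rw [PySem.List.slice_natCast_add]
        exact (List.prefix_iff_eq_take.mp hqm).symm)
  simp only [Nat.cast_zero, List.drop_zero, List.nil_append] at hfold
  exact hfold

-- ===== VERDICT (by name: the statement is the Claim_ definition above) =====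
theorem replace_ngram_in_line_spec : Claim_equal_replace_ngram_in_line := by
  intro tokens ngram replacement_token _hdom hpre
  unfold Spec_replace_ngram_in_line
  cases ngram with
  | nil =>
    have ht : tokens = [] := by
      rcases hpre with h | h
      · exact absurd rfl h
      · exact h
    subst ht; rfl
  | cons g gs =>
    rw [altB_eq_pvR]
    have := pvLoopA_eq_pvR tokens g gs replacement_token (tokens.length + 1) 0 [] (by omega)
    simpa [replace_ngram_in_line] using this
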